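-- pv_equiv track=rewrite | github.com/ZigAnon/zigbot | bin/zb_checks.py | print_lookup
-- ===== SOURCE A (Python) =====
-- def how_wide(data):
--     longest = max(data, key=len)
--     length = len(longest)
--     return length
--
-- def pad_spaces(data):
--     length = how_wide(data)
--     spaces = ' '
--
--     i = 0
--     while i < length:
--         spaces = spaces + ' '
--         i+=1
--     lst = [' {0}{1} '.format(x, spaces[0:length-len(x)]) for x in data]
--     return lst
--
-- def print_lookup(rows,data,title):
--
--     # Build a title bar
--     maxTitle = len(title)
--     bar = '---==='
--     i = 0
--     while i < maxTitle:
--         bar = bar + '='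
--         i+=1
--     top = bar + '===---'
--
--     if rows == 0:
--         string = ('```\n      ' + title + '\n' + top + '\n' +
--                   '   Empty list```')
--         return string
--
--     maxRows = range(rows)
--     maxEle = range(len(data[0]))
--     matrix = [[0 for x in maxRows] for y in maxEle]
--
--     for x in maxEle:
--         for y in maxRows:
--             matrix[x-1][y-1] = str(data[y-1][x-1])
--
--     lenTotal = -10
--     for x in maxEle:
--         matrix[x-1][:] = pad_spaces(matrix[x-1][:])
--         lenTotal = lenTotal + len(matrix[x-1][0]) + 2
--
--     test = lenTotal - maxTitle
--     if lenTotal > maxTitle: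
--         i = 0
--         while i < test:
--             bar = bar + '='
--             i+=1
--         bar = bar + '===---'
--     else:
--         bar = top
--
--     string = '```\n      ' + title + '\n' + bar + '\n'
--
--     for x in maxRows:
--         string = string + '||'
--         for y in maxEle:
--             string = string + matrix[y-1][x-1]
--             if y+1 != len(data[0]) and test < 0:
--                 string = string + '||'
--             else:
--                 i = test
--                 while i < 0:
--                     string = string + ' '
--                     i+=1
--                 string = string + '||'
--         string = string + '\n'
--
--     string = string + bar + '\n'
--
--     string = string + '```'
--     return string
-- ===== SOURCE B (Python) =====
-- def print_lookup(rows, data, title):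
--     """Render records as a code-fenced ASCII table whose bar and body lines share
--     one overall width; cell (r, c) shows data[r - 1][c - 1] (the last record and
--     last field lead, wrapping around)."""
--     head = '```\n      ' + title + '\n'
--     if rows == 0:
--         return head + '---===' + '=' * len(title) + '===---\n   Empty list```'
--     cols = len(data[0])
--     grid = [[data[r - 1][c - 1] for c in range(cols)] for r in range(rows)]
--     widths = [max(len(row[c]) for row in grid) for c in range(cols)]
--     line_width = 2 + sum(w + 4 for w in widths)
--     width = max(line_width, len(title) + 12)
--     bar = '---===' + '=' * (width - 12) + '===---'
--     lines = []
--     for row in grid: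
--         cells = [' ' + cell.ljust(w) + ' ' for cell, w in zip(row, widths)]
--         if cells:
--             cells[-1] += ' ' * (width - line_width)
--         lines.append('||'.join([''] + cells) + '||\n')
--     return head + bar + '\n' + ''.join(lines) + bar + '\n```'
-- ===== Notes on version B (the rewrite author's own statement) =====
-- stated objective: simpler
-- what changed: B drops A's transposed matrix with its in-place index-shifted writes, the pad_spaces/lenTotal mutation pass and the character-by-character bar/space while-loops; it builds the grid of printed cells directly, takes one max per column for the widths, derives a single shared overall width for bar and lines, and emits every line with join/ljust and string repetition.
import Mathlib
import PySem

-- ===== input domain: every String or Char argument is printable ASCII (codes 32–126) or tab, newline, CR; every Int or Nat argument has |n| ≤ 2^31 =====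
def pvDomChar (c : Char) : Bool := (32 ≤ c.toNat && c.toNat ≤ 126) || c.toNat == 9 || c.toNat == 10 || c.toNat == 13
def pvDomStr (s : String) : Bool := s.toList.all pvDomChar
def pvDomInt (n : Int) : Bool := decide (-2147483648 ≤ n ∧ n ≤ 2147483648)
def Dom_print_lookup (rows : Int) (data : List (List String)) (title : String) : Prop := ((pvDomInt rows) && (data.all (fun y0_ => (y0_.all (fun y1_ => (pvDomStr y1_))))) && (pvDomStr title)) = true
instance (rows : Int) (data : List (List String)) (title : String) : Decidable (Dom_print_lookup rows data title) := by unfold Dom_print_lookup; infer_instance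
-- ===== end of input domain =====

-- B drops A's transposed matrix and mutation passes: it builds the grid of printed
-- cells directly, takes one max per column, and emits each line at one shared width.
-- Equivalence is about the RETURN value (A mutates only its own locals).

-- ===== PORT A =====

-- Python list item assignment l[i] = v (negative index wraps; out-of-range raises, excluded by Pre_)
def pvSet {α : Type} (l : List α) (i : Int) (v : α) : List α :=
  let j := if i < 0 then i + l.length else i
  if 0 ≤ j ∧ j < l.length then l.set j.toNat v else l

-- how_wide(data): max(data, key=len) (first longest), then its length
def pvHowWide (l : List (List Char)) : Int :=
  ((PySem.List.max? l (fun x => (x.length : Int))).getD []).length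

-- pad_spaces(data)
def pvPadSpaces (l : List (List Char)) : List (List Char) :=
  let length := pvHowWide l
  let spaces := (PySem.List.pyRange 0 length 1).foldl (fun s _ => s ++ [' ']) [' ']
  l.map (fun x => [' '] ++ x ++ PySem.List.slice spaces (some 0) (some (length - (x.length : Int))) ++ [' '])

def print_lookup (rows : Int) (data0 : List (List String)) (title : String) : String :=
  let data : List (List (List Char)) := data0.map (fun r => r.map String.toList)
  let t := title.toList
  let maxTitle : Int := t.length
  let bar1 := (PySem.List.pyRange 0 maxTitle 1).foldl (fun b _ => b ++ ['=']) "---===".toList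
  let top := bar1 ++ "===---".toList
  if rows = 0 then
    String.ofList ("```\n      ".toList ++ t ++ "\n".toList ++ top ++ "\n".toList ++ "   Empty list```".toList)
  else
    let maxRows := PySem.List.pyRange 0 rows 1
    let cols : Int := ((PySem.List.pyGetD data 0 []).length : Int)
    let maxEle := PySem.List.pyRange 0 cols 1
    -- matrix initialised with int 0; modeled as "0" (always overwritten inside Pre_, never printed)
    let matrix : List (List (List Char)) := maxEle.map (fun _ => maxRows.map (fun _ => ['0']))
    -- for x in maxEle: for y in maxRows: matrix[x-1][y-1] = str(data[y-1][x-1])  (str of a str is itself)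
    let matrix := maxEle.foldl (fun m x => maxRows.foldl (fun m y =>
        pvSet m (x-1) (pvSet (PySem.List.pyGetD m (x-1) []) (y-1)
          (PySem.List.pyGetD (PySem.List.pyGetD data (y-1) []) (x-1) []))) m) matrix
    -- for x in maxEle: matrix[x-1][:] = pad_spaces(matrix[x-1][:]); lenTotal += len(matrix[x-1][0]) + 2
    let st := maxEle.foldl (fun (st : List (List (List Char)) × Int) x =>
        let m := pvSet st.1 (x-1) (pvPadSpaces (PySem.List.pyGetD st.1 (x-1) []))
        (m, st.2 + ((PySem.List.pyGetD (PySem.List.pyGetD m (x-1) []) 0 []).length : Int) + 2)) (matrix, -10)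
    let matrix := st.1
    let lenTotal := st.2
    let test := lenTotal - maxTitle
    let bar := if lenTotal > maxTitle then
        ((PySem.List.pyRange 0 test 1).foldl (fun b _ => b ++ ['=']) bar1) ++ "===---".toList
      else top
    let s0 := "```\n      ".toList ++ t ++ "\n".toList ++ bar ++ "\n".toList
    let s1 := maxRows.foldl (fun s x =>
        let s := s ++ "||".toList
        let s := maxEle.foldl (fun s y =>
          let s := s ++ PySem.List.pyGetD (PySem.List.pyGetD matrix (y-1) []) (x-1) []
          if y + 1 ≠ cols ∧ test < 0 then s ++ "||".toList
          else ((PySem.List.pyRange test 0 1).foldl (fun s _ => s ++ [' ']) s) ++ "||".toList) s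
        s ++ "\n".toList) s0
    String.ofList (s1 ++ bar ++ "\n".toList ++ "```".toList)

-- ===== PORT B =====

def print_lookup_alt (rows : Int) (data0 : List (List String)) (title : String) : String :=
  let data : List (List (List Char)) := data0.map (fun r => r.map String.toList)
  let t := title.toList
  let head := "```\n      ".toList ++ t ++ "\n".toList
  if rows = 0 then
    String.ofList (head ++ "---===".toList ++ List.replicate t.length '='
      ++ "===---\n   Empty list```".toList)
  else
    let cols : Int := ((PySem.List.pyGetD data 0 []).length : Int)
    let grid : List (List (List Char)) :=
      (PySem.List.pyRange 0 rows 1).map (fun r =>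
        (PySem.List.pyRange 0 cols 1).map (fun c =>
          PySem.List.pyGetD (PySem.List.pyGetD data (r - 1) []) (c - 1) []))
    let widths : List Int :=
      (PySem.List.pyRange 0 cols 1).map (fun c =>
        (PySem.List.max? (grid.map (fun row => ((PySem.List.pyGetD row c []).length : Int)))
          (fun v => v)).getD 0)
    let lineWidth : Int := 2 + (widths.map (fun w => w + 4)).sum
    let width : Int := max lineWidth ((t.length : Int) + 12)
    let bar := "---===".toList ++ List.replicate (width - 12).toNat '=' ++ "===---".toList
    let filler := List.replicate (width - lineWidth).toNat ' '
    let lines := grid.map (fun row =>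
      let cells := (row.zip widths).map (fun cw =>
        [' '] ++ cw.1 ++ List.replicate (cw.2 - (cw.1.length : Int)).toNat ' ' ++ [' '])
      let cells := if cells.isEmpty then cells
        else cells.dropLast ++ [cells.getLastD [] ++ filler]
      PySem.Chars.join "||".toList (([] : List Char) :: cells) ++ "||".toList ++ "\n".toList)
    String.ofList (head ++ bar ++ "\n".toList ++ lines.flatten ++ bar ++ "\n```".toList)

-- ===== PRECONDITION & SPEC =====
-- Pre_ excludes exactly the inputs where A raises: nonzero rows with empty data (IndexError on
-- data[0]) and, when the first row is nonempty, rows outside 1..len(data)+1 (IndexError /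
-- ValueError on max of an empty column) or an accessed row that is empty or shorter than
-- len(data[0])-1 (IndexError on a cell).
def Pre_print_lookup (rows : Int) (data : List (List String)) (title : String) : Prop :=
  rows = 0 ∨ (data ≠ [] ∧ (data.headI.length = 0 ∨
    (0 < rows ∧ rows ≤ (data.length : Int) + 1 ∧
      ∀ r ∈ (data.getLastD [] :: data.take (rows - 1).toNat),
        1 ≤ r.length ∧ data.headI.length - 1 ≤ r.length)))
instance (rows : Int) (data : List (List String)) (title : String) : Decidable (Pre_print_lookup rows data title) := by
  unfold Pre_print_lookup; infer_instance

def pvWitness_print_lookup : Int × List (List String) × String := (2, [["a", "bb"], ["ccc", "d"]], "Ti")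

def Spec_print_lookup (rows : Int) (data : List (List String)) (title : String) (out : String) : Prop := out = print_lookup_alt rows data title
instance (rows : Int) (data : List (List String)) (title : String) (out : String) : Decidable (Spec_print_lookup rows data title out) := by unfold Spec_print_lookup; infer_instance

-- ===== CLAIM (what is proved, stated in full; the proofs are below) =====
def Claim_equal_print_lookup : Prop := ∀ (rows : Int) (data : List (List String)) (title : String), Dom_print_lookup rows data title → Pre_print_lookup rows data title → Spec_print_lookup rows data title (print_lookup rows data title)

-- ===== LEMMAS AND PROOFS =====

-- Python "valid index" predicate for l[i]
def pvOK {α : Type} (l : List α) (i : Int) : Prop := -(l.length : Int) ≤ i ∧ i < l.length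

def pvJ (n : Nat) (i : Int) : Nat := (if i < 0 then i + n else i).toNat

theorem pvJ_lt {α : Type} (l : List α) (i : Int) (h : pvOK l i) : pvJ l.length i < l.length := by
  unfold pvOK at h; unfold pvJ; split <;> omega

theorem pvSet_eq_set {α : Type} (l : List α) (i : Int) (v : α) (h : pvOK l i) :
    pvSet l i v = l.set (pvJ l.length i) v := by
  unfold pvOK at h; unfold pvSet pvJ
  by_cases hi : i < 0
  · simp only [if_pos hi]; rw [if_pos (by omega)]
  · simp only [if_neg hi]; rw [if_pos (by omega)]

theorem pvSet_of_not_ok {α : Type} (l : List α) (i : Int) (v : α) (h : ¬ pvOK l i) :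
    pvSet l i v = l := by
  unfold pvOK at h; unfold pvSet
  by_cases hi : i < 0
  · simp only [if_pos hi]; rw [if_neg (by omega)]
  · simp only [if_neg hi]; rw [if_neg (by omega)]

theorem pyGetD_eq_getD {α : Type} (l : List α) (i : Int) (d : α) (h : pvOK l i) :
    PySem.List.pyGetD l i d = l.getD (pvJ l.length i) d := by
  unfold pvOK at h
  simp only [PySem.List.pyGetD, PySem.List.pyGet?, PySem.List.pyIdx?, pvJ]
  have hl : (0:Int) ≤ l.length := by positivity
  by_cases hi : 0 ≤ i
  · simp only [if_pos hi, if_pos h.2, if_neg (by omega : ¬ i < 0)]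
    simp [List.getD, List.getElem?_eq_getElem (by omega : i.toNat < l.length)]
  · simp only [if_neg hi, if_pos h.1, if_pos (by omega : i < 0)]
    have he : l.length - (-i).toNat = (i + l.length).toNat := by omega
    rw [he]
    simp [List.getD, List.getElem?_eq_getElem (by omega : (i + (l.length:Int)).toNat < l.length)]

theorem pyGetD_pvSet_same {α : Type} (l : List α) (i : Int) (v : α) (d : α) (h : pvOK l i) :
    PySem.List.pyGetD (pvSet l i v) i d = v := by
  rw [pvSet_eq_set l i v h, pyGetD_eq_getD _ _ _ (by unfold pvOK at *; simpa using h)]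
  have hj := pvJ_lt l i h
  simp [List.getD, List.length_set, hj]

theorem pvSet_pvSet {α : Type} (l : List α) (i : Int) (a b : α) :
    pvSet (pvSet l i a) i b = pvSet l i b := by
  by_cases h : pvOK l i
  · rw [pvSet_eq_set l i a h, pvSet_eq_set _ i b (by unfold pvOK at *; simpa using h),
      pvSet_eq_set l i b h]
    simp [List.set_set]
  · rw [pvSet_of_not_ok l i a h, pvSet_of_not_ok l i b h]

theorem pvSet_getD_self {α : Type} (l : List α) (i : Int) (d : α) :
    pvSet l i (PySem.List.pyGetD l i d) = l := by
  by_cases h : pvOK l i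
  · rw [pyGetD_eq_getD l i d h, pvSet_eq_set _ _ _ h]
    have hj := pvJ_lt l i h
    simp [List.getD, List.getElem?_eq_getElem hj, List.set_getElem_self]
  · exact pvSet_of_not_ok l i _ h

theorem pv_foldl_col {α β : Type} (ys : List β) (G : List α → β → List α) (i : Int)
    (l : List (List α)) :
    ys.foldl (fun m y => pvSet m i (G (PySem.List.pyGetD m i []) y)) l
      = pvSet l i (ys.foldl G (PySem.List.pyGetD l i [])) := by
  induction ys generalizing l with
  | nil => simp [pvSet_getD_self]
  | cons y ys ih =>
    simp only [List.foldl_cons]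
    rw [ih]
    by_cases h : pvOK l i
    · rw [pyGetD_pvSet_same _ _ _ _ h, pvSet_pvSet]
    · rw [pvSet_of_not_ok _ _ _ h, pvSet_of_not_ok _ _ _ h, pvSet_of_not_ok _ _ _ h]

theorem pv_len_pyRange_to_zero (a : Int) : (PySem.List.pyRange a 0 1).length = (-a).toNat := by
  simp only [PySem.List.pyRange]
  norm_num
  omega

theorem pv_foldl_const_append {α : Type} (l : List α) (c : Char) (b : List Char) :
    l.foldl (fun s _ => s ++ [c]) b = b ++ List.replicate l.length c := by
  have : (fun (s : List Char) (_ : α) => s ++ [c]) = fun s x => s ++ [(fun _ => c) x] := rfl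
  rw [this, PySem.List.foldl_append_singleton_eq_map, List.map_const']

theorem pv_getD_neg_one {α : Type} (l : List α) (h : l ≠ []) (d : α) :
    PySem.List.pyGetD l (-1) d = l.getD (l.length - 1) d := by
  have hl : 0 < l.length := List.length_pos_iff.mpr h
  rw [pyGetD_eq_getD _ _ _ (by unfold pvOK; omega)]
  unfold pvJ
  congr 1
  omega

theorem pv_set_neg_one {α : Type} (l : List α) (h : l ≠ []) (v : α) :
    pvSet l (-1) v = l.set (l.length - 1) v := by
  have hl : 0 < l.length := List.length_pos_iff.mpr h
  rw [pvSet_eq_set _ _ _ (by unfold pvOK; omega)]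
  unfold pvJ
  congr 1
  omega

theorem pv_fill1d_tail {α : Type} (k : Nat) (F : Int → α → α) (M : List α) (d : α)
    (hk : k ≤ M.length) :
    ((List.range' 1 k).map (Nat.cast : Nat → Int)).foldl
        (fun l y => pvSet l (y - 1) (F y (PySem.List.pyGetD l (y - 1) d))) M
      = (List.range k).map (fun r : Nat => F ((r : Int) + 1) (M.getD r d)) ++ M.drop k := by
  induction k with
  | zero => simp
  | succ k ih =>
    have hk' : k ≤ M.length := by omega
    rw [List.range'_concat, List.map_append, List.foldl_append, ih hk']
    simp only [List.map_cons, List.map_nil, List.foldl_cons, List.foldl_nil]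
    set R := (List.range k).map (fun r : Nat => F ((r : Int) + 1) (M.getD r d)) ++ M.drop k with hR
    have hRlen : R.length = M.length := by rw [hR]; simp; omega
    have hidx : ((1 + 1 * k : Nat) : Int) - 1 = ((k : Nat) : Int) := by push_cast; ring
    rw [hidx]
    have hokR : pvOK R ((k : Nat) : Int) := by unfold pvOK; rw [hRlen]; constructor <;> omega
    have hgetR : PySem.List.pyGetD R ((k : Nat) : Int) d = M.getD k d := by
      rw [pyGetD_eq_getD _ _ _ hokR]
      unfold pvJ
      rw [if_neg (by omega)]
      simp only [Int.toNat_natCast]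
      rw [hR]
      rw [List.getD_eq_getElem _ _ (by simp; omega), List.getD_eq_getElem _ _ (by omega)]
      rw [List.getElem_append_right (by simp)]
      simp
    rw [hgetR]
    rw [pvSet_eq_set _ _ _ hokR]
    unfold pvJ
    rw [if_neg (by omega)]
    simp only [Int.toNat_natCast]
    rw [hR]
    have hdrop : M.drop k = M.getD k d :: M.drop (k + 1) := by
      rw [List.getD_eq_getElem _ _ (by omega : k < M.length)]
      exact List.drop_eq_getElem_cons (by omega)
    rw [hdrop, List.set_append_right _ _ (by simp)]
    rw [List.range_succ, List.map_append, List.map_singleton]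
    simp
    rw [add_comm 1 ((k:Nat):Int)]

theorem pv_range_cast_cons (n : Nat) (hn : 1 ≤ n) :
    List.map (fun k : Nat => (k : Int)) (List.range n)
      = (0 : Int) :: List.map (fun k : Nat => (k : Int)) (List.range' 1 (n - 1)) := by
  obtain ⟨k, rfl⟩ : ∃ k, n = k + 1 := ⟨n - 1, by omega⟩
  rw [List.range_eq_range', List.range'_succ]
  simp

theorem pv_fill1d {α : Type} (n : Nat) (hn : 1 ≤ n) (F : Int → α → α) (init : List α) (d : α)
    (hlen : init.length = n) :
    (PySem.List.pyRange 0 (n : Int) 1).foldl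
        (fun l y => pvSet l (y - 1) (F y (PySem.List.pyGetD l (y - 1) d))) init
      = (List.range (n - 1)).map (fun r : Nat => F ((r : Int) + 1) (init.getD r d))
          ++ [F 0 (init.getD (n - 1) d)] := by
  obtain ⟨k, rfl⟩ : ∃ k, n = k + 1 := ⟨n - 1, by omega⟩
  have hne : init ≠ [] := by intro h; rw [h] at hlen; simp at hlen
  rw [PySem.List.pyRange_zero_natCast, pv_range_cast_cons (k + 1) (by omega), List.foldl_cons]
  have h0 : (0 : Int) - 1 = -1 := by ring
  rw [h0, pv_getD_neg_one init hne d, pv_set_neg_one init hne _, hlen]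
  simp only [Nat.add_sub_cancel]
  generalize hv : F 0 (init.getD k d) = v
  rw [pv_fill1d_tail k F (init.set k v) d (by simp; omega)]
  congr 1
  · apply List.map_congr_left
    intro r hr
    have hr' : r < k := List.mem_range.mp hr
    rw [List.getD_eq_getElem _ _ (by simp; omega), List.getD_eq_getElem _ _ (by omega)]
    rw [List.getElem_set_ne (by omega)]
  · have h1 : (init.set k v).drop k
        = (init.set k v)[k]'(by simp; omega) :: (init.set k v).drop (k + 1) :=
      List.drop_eq_getElem_cons (by simp; omega)
    rw [h1, List.drop_eq_nil_of_le (by simp; omega), List.getElem_set_self]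

theorem pv_fill1d_pair_tail {α : Type} (k : Nat) (P : α → α) (Acc : α → Int) (M : List α)
    (a1 : Int) (d : α) (hk : k ≤ M.length) :
    ((List.range' 1 k).map (Nat.cast : Nat → Int)).foldl
        (fun (st : List α × Int) y =>
          (pvSet st.1 (y - 1) (P (PySem.List.pyGetD st.1 (y - 1) d)),
           st.2 + Acc (PySem.List.pyGetD
             (pvSet st.1 (y - 1) (P (PySem.List.pyGetD st.1 (y - 1) d))) (y - 1) d)))
        (M, a1)
      = ((List.range k).map (fun r : Nat => P (M.getD r d)) ++ M.drop k,
         a1 + ((List.range k).map (fun r : Nat => Acc (P (M.getD r d)))).sum) := by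
  induction k with
  | zero => simp
  | succ k ih =>
    have hk' : k ≤ M.length := by omega
    rw [List.range'_concat, List.map_append, List.foldl_append, ih hk']
    simp only [List.map_cons, List.map_nil, List.foldl_cons, List.foldl_nil]
    set R := (List.range k).map (fun r : Nat => P (M.getD r d)) ++ M.drop k with hR
    have hRlen : R.length = M.length := by rw [hR]; simp; omega
    have hidx : ((1 + 1 * k : Nat) : Int) - 1 = ((k : Nat) : Int) := by push_cast; ring
    simp only [hidx]
    have hokR : pvOK R ((k : Nat) : Int) := by unfold pvOK; rw [hRlen]; constructor <;> omega
    have hgetR : PySem.List.pyGetD R ((k : Nat) : Int) d = M.getD k d := by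
      rw [pyGetD_eq_getD _ _ _ hokR]
      unfold pvJ
      rw [if_neg (by omega)]
      simp only [Int.toNat_natCast]
      rw [hR]
      rw [List.getD_eq_getElem _ _ (by simp; omega), List.getD_eq_getElem _ _ (by omega)]
      rw [List.getElem_append_right (by simp)]
      simp
    rw [hgetR]
    rw [pyGetD_pvSet_same _ _ _ _ hokR]
    rw [pvSet_eq_set _ _ _ hokR]
    unfold pvJ
    rw [if_neg (by omega)]
    simp only [Int.toNat_natCast]
    rw [hR]
    have hdrop : M.drop k = M.getD k d :: M.drop (k + 1) := by
      rw [List.getD_eq_getElem _ _ (by omega : k < M.length)]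
      exact List.drop_eq_getElem_cons (by omega)
    rw [hdrop, List.set_append_right _ _ (by simp)]
    rw [List.range_succ, List.map_append, List.map_singleton, List.map_append,
      List.map_singleton, List.sum_append]
    simp [add_assoc]

theorem pv_fill1d_pair {α : Type} (n : Nat) (hn : 1 ≤ n) (P : α → α) (Acc : α → Int)
    (init : List α) (a0 : Int) (d : α) (hlen : init.length = n) :
    (PySem.List.pyRange 0 (n : Int) 1).foldl
        (fun (st : List α × Int) y =>
          (pvSet st.1 (y - 1) (P (PySem.List.pyGetD st.1 (y - 1) d)),
           st.2 + Acc (PySem.List.pyGetD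
             (pvSet st.1 (y - 1) (P (PySem.List.pyGetD st.1 (y - 1) d))) (y - 1) d)))
        (init, a0)
      = ((List.range (n - 1)).map (fun r : Nat => P (init.getD r d)) ++ [P (init.getD (n - 1) d)],
         a0 + Acc (P (init.getD (n - 1) d))
           + ((List.range (n - 1)).map (fun r : Nat => Acc (P (init.getD r d)))).sum) := by
  obtain ⟨k, rfl⟩ : ∃ k, n = k + 1 := ⟨n - 1, by omega⟩
  have hne : init ≠ [] := by intro h; rw [h] at hlen; simp at hlen
  rw [PySem.List.pyRange_zero_natCast, pv_range_cast_cons (k + 1) (by omega), List.foldl_cons]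
  have h0 : (0 : Int) - 1 = -1 := by ring
  have hok : pvOK init (-1) := by
    unfold pvOK
    have : 0 < init.length := List.length_pos_iff.mpr hne
    constructor <;> omega
  simp only [h0]
  rw [pyGetD_pvSet_same _ _ _ _ hok]
  rw [pv_getD_neg_one init hne d, pv_set_neg_one init hne _, hlen]
  simp only [Nat.add_sub_cancel]
  generalize hv : P (init.getD k d) = v
  rw [pv_fill1d_pair_tail k P Acc (init.set k v) (a0 + Acc v) d (by simp; omega)]
  have hgd : ∀ r : Nat, r < k → (init.set k v).getD r d = init.getD r d := by
    intro r hr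
    rw [List.getD_eq_getElem _ _ (by simp; omega), List.getD_eq_getElem _ _ (by omega)]
    rw [List.getElem_set_ne (by omega)]
  have hmap1 : List.map (fun r : Nat => P ((init.set k v).getD r d)) (List.range k)
      = List.map (fun r : Nat => P (init.getD r d)) (List.range k) :=
    List.map_congr_left (fun r hr => by rw [hgd r (List.mem_range.mp hr)])
  have hmap2 : List.map (fun r : Nat => Acc (P ((init.set k v).getD r d))) (List.range k)
      = List.map (fun r : Nat => Acc (P (init.getD r d))) (List.range k) :=
    List.map_congr_left (fun r hr => by rw [hgd r (List.mem_range.mp hr)])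
  have hdrop : (init.set k v).drop k = [v] := by
    have h1 : (init.set k v).drop k
        = (init.set k v)[k]'(by simp; omega) :: (init.set k v).drop (k + 1) :=
      List.drop_eq_getElem_cons (by simp; omega)
    rw [h1, List.drop_eq_nil_of_le (by simp; omega), List.getElem_set_self]
  rw [hmap1, hmap2, hdrop]

-- pyGetD into A's rotated column/matrix layout: index x-1 (x = 0..n-1) reads slot g x
theorem pv_getD_rot {α : Type} (n : Nat) (g : Nat → α) (x : Nat) (hx : x < n) (d : α) :
    PySem.List.pyGetD ((List.range (n - 1)).map (fun r : Nat => g (r + 1)) ++ [g 0])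
      (((x : Nat) : Int) - 1) d = g x := by
  set L := (List.range (n - 1)).map (fun r : Nat => g (r + 1)) ++ [g 0] with hL
  have hlen : L.length = n := by rw [hL]; simp; omega
  have hok : pvOK L ((x : Int) - 1) := by unfold pvOK; rw [hlen]; constructor <;> omega
  rw [pyGetD_eq_getD _ _ _ hok]
  unfold pvJ
  rcases Nat.eq_zero_or_pos x with h0 | hpos
  · subst h0
    rw [if_pos (by omega), hlen]
    simp only [Nat.cast_zero]
    rw [show ((0 : Int) - 1 + (n : Int)).toNat = n - 1 by omega]
    rw [hL, List.getD_eq_getElem _ _ (by simp; try omega), List.getElem_append_right (by simp; try omega)]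
    simp
  · rw [if_neg (by omega)]
    rw [show ((x : Int) - 1).toNat = x - 1 by omega]
    rw [hL, List.getD_eq_getElem _ _ (by simp; try omega), List.getElem_append_left (by simp; try omega)]
    simp only [List.getElem_map, List.getElem_range]
    congr 1
    omega

-- first element attaining the max (identity key) is determined by the multiset
theorem pv_max_id_perm (l l' : List Int) (hp : l.Perm l') :
    PySem.List.max? l (fun v => v) = PySem.List.max? l' (fun v => v) := by
  rcases h1 : PySem.List.max? l (fun v => v) with _ | m1
  · rw [PySem.List.max?_eq_none_iff] at h1
    subst h1
    have h2 : l' = [] := (List.Perm.nil_eq hp).symm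
    subst h2
    rw [(PySem.List.max?_eq_none_iff _ _).mpr rfl]
  · rcases h2 : PySem.List.max? l' (fun v => v) with _ | m2
    · rw [PySem.List.max?_eq_none_iff] at h2
      subst h2
      have h3 : l = [] := List.perm_nil.mp hp
      subst h3
      rw [(PySem.List.max?_eq_none_iff _ _).mpr rfl] at h1
      cases h1
    · have hm1 := PySem.List.max?_mem h1
      have hm2 := PySem.List.max?_mem h2
      have hle1 := PySem.List.max?_isMax h1
      have hle2 := PySem.List.max?_isMax h2
      exact congrArg some (le_antisymm (hle2 m1 (hp.mem_iff.mp hm1)) (hle1 m2 (hp.mem_iff.mpr hm2)))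

theorem pv_howWide_nonneg (l : List (List Char)) : 0 ≤ pvHowWide l := by
  unfold pvHowWide; positivity

theorem pv_howWide_isMax (l : List (List Char)) (x : List Char) (hx : x ∈ l) :
    (x.length : Int) ≤ pvHowWide l := by
  unfold pvHowWide
  rcases h1 : PySem.List.max? l (fun z => (z.length : Int)) with _ | m
  · rw [PySem.List.max?_eq_none_iff] at h1; subst h1; cases hx
  · simpa using PySem.List.max?_isMax h1 x hx

theorem pv_howWide_eq (l : List (List Char)) (h : l ≠ []) :
    pvHowWide l
      = (PySem.List.max? (l.map (fun x => (x.length : Int))) (fun v => v)).getD 0 := by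
  unfold pvHowWide
  rcases h1 : PySem.List.max? l (fun z => (z.length : Int)) with _ | m
  · rw [PySem.List.max?_eq_none_iff] at h1; cases h h1
  · rcases h2 : PySem.List.max? (l.map (fun x => (x.length : Int))) (fun v => v) with _ | m2
    · rw [PySem.List.max?_eq_none_iff] at h2
      simp only [List.map_eq_nil_iff] at h2
      cases h h2
    · have hm1 : m ∈ l := PySem.List.max?_mem h1
      have hm2 : m2 ∈ l.map (fun x => (x.length : Int)) := PySem.List.max?_mem h2
      have hle1 := PySem.List.max?_isMax h1
      have hle2 := PySem.List.max?_isMax h2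
      simp only [List.mem_map] at hm2
      obtain ⟨y, hy, rfl⟩ := hm2
      have e1 : (y.length : Int) ≤ (m.length : Int) := by
        simpa using hle1 y hy
      have e2 : (m.length : Int) ≤ (y.length : Int) :=
        hle2 (m.length : Int) (List.mem_map.mpr ⟨m, hm1, rfl⟩)
      rw [h2]
      simp only [Option.getD_some]
      omega

theorem pv_padSpaces_eq (l : List (List Char)) (h : l ≠ []) :
    pvPadSpaces l
      = l.map (fun x => [' '] ++ x ++ List.replicate ((pvHowWide l).toNat - x.length) ' ' ++ [' ']) := by
  unfold pvPadSpaces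
  have hW : (pvHowWide l) = (((pvHowWide l).toNat : Nat) : Int) :=
    (Int.toNat_of_nonneg (pv_howWide_nonneg l)).symm
  set W := (pvHowWide l).toNat with hWdef
  simp only []
  rw [hW, PySem.List.pyRange_zero_natCast]
  rw [show (List.map (fun k : Nat => (k : Int)) (List.range W)).foldl (fun s _ => s ++ [' ']) [' ']
      = [' '] ++ List.replicate ((List.map (fun k : Nat => (k : Int)) (List.range W)).length) ' '
    from pv_foldl_const_append _ ' ' [' ']]
  simp only [List.length_map, List.length_range]
  apply List.map_congr_left
  intro x hx
  have hxle : (x.length : Int) ≤ (W : Int) := by rw [← hW]; exact pv_howWide_isMax l x hx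
  have h0 : (0 : Int) ≤ (W : Int) - (x.length : Int) := by omega
  rw [show ([' '] ++ List.replicate W ' ' : List Char) = List.replicate (W + 1) ' ' by
    simp [List.replicate_succ]]
  rw [PySem.List.slice_zero_start, PySem.List.slice_to _ h0, List.take_replicate]
  have ht : ((W : Int) - (x.length : Int)).toNat = W - x.length := by omega
  rw [ht, min_eq_left (by omega)]

theorem pv_join_shape (sep : List Char) (cs : List (List Char)) (h : cs ≠ []) :
    PySem.Chars.join sep cs
      = ((cs.dropLast).map (fun c => c ++ sep)).flatten ++ cs.getLastD [] := by
  induction cs with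
  | nil => cases h rfl
  | cons c cs ih =>
    cases cs with
    | nil => simp [PySem.Chars.join_singleton]
    | cons c2 rest =>
      rw [PySem.Chars.join_cons_cons, ih (by simp)]
      simp [List.append_assoc]

theorem pv_join_nil_cons (sep : List Char) (cs : List (List Char)) (h : cs ≠ []) :
    PySem.Chars.join sep (([] : List Char) :: cs) = sep ++ PySem.Chars.join sep cs := by
  cases cs with
  | nil => cases h rfl
  | cons c rest => rw [PySem.Chars.join_cons_cons]; simp

theorem pv_join_pad_last (sep f : List Char) (cs : List (List Char)) (h : cs ≠ []) :
    PySem.Chars.join sep (cs.dropLast ++ [cs.getLastD [] ++ f])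
      = PySem.Chars.join sep cs ++ f := by
  rw [pv_join_shape sep (cs.dropLast ++ [cs.getLastD [] ++ f]) (by simp),
    pv_join_shape sep cs h]
  rw [List.dropLast_concat, List.getLastD_concat]
  simp [List.append_assoc]

theorem pv_pyRange_to_toNat (a : Int) :
    PySem.List.pyRange 0 a 1 = (List.range a.toNat).map (fun k : Nat => (k : Int)) := by
  rcases le_or_gt 0 a with h | h
  · conv_lhs => rw [show a = ((a.toNat : Nat) : Int) by omega]
    rw [PySem.List.pyRange_zero_natCast]
  · rw [show a.toNat = 0 by omega]
    simp only [List.range_zero, List.map_nil]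
    simp [PySem.List.pyRange]
    omega

theorem pv_range_map_head {γ : Type} (n : Nat) (hn : 1 ≤ n) (f : Nat → γ) :
    (List.range n).map f = f 0 :: (List.range (n - 1)).map (fun r => f (r + 1)) := by
  obtain ⟨k, rfl⟩ : ∃ k, n = k + 1 := ⟨n - 1, by omega⟩
  rw [List.range_eq_range', List.range'_succ]
  simp only [List.map_cons, Nat.add_sub_cancel, List.range'_eq_map_range, List.map_map]
  congr 1
  apply List.map_congr_left
  intro r _
  simp [Function.comp, add_comm]

theorem pv_getD_rot_list {α : Type} (k : Nat) (g : Nat → α) (d : α) :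
    ∀ r : Nat, r ≤ k → ((List.range k).map (fun c : Nat => g (c + 1)) ++ [g 0]).getD r d = g (if r = k then 0 else r + 1) := by
  intro r hr
  rcases eq_or_lt_of_le hr with rfl | hlt
  · rw [List.getD_eq_getElem _ _ (by simp)]
    rw [List.getElem_append_right (by simp)]
    simp
  · rw [if_neg (by omega), List.getD_eq_getElem _ _ (by simp; omega),
      List.getElem_append_left (by simp; omega)]
    simp

theorem pv_headI_eq_getD0 {α : Type} [Inhabited α] (l : List α) (h : l ≠ []) (d : α) :
    PySem.List.pyGetD l 0 d = l.headI := by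
  cases l with
  | nil => cases h rfl
  | cons a t => simp [PySem.List.pyGetD, PySem.List.pyGet?, PySem.List.pyIdx?]

def pvPCc (data : List (List (List Char))) (c r : Int) : List Char :=
  PySem.List.pyGetD (PySem.List.pyGetD data (r - 1) []) (c - 1) ([] : List Char)

def pvColN (data : List (List (List Char))) (n : Nat) (x : Int) : List (List Char) :=
  (List.range (n - 1)).map (fun r : Nat => pvPCc data x ((r : Int) + 1)) ++ [pvPCc data x 0]

theorem pv_colN_ne_nil (D : List (List (List Char))) (n : Nat) (x : Int) : pvColN D n x ≠ [] := by
  unfold pvColN; simp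

theorem pv_widthB_eq (D : List (List (List Char))) (n m : Nat) (hn : 1 ≤ n) (y : Nat) (hy : y < m) :
    (PySem.List.max? (((List.range n).map (fun r : Nat =>
          (List.range m).map (fun c : Nat => pvPCc D ((c : Nat) : Int) ((r : Nat) : Int)))).map
        (fun row => ((PySem.List.pyGetD row ((y : Nat) : Int) []).length : Int))) (fun v => v)).getD 0
      = pvHowWide (pvColN D n ((y : Nat) : Int)) := by
  rw [List.map_map]
  have h1 : ((fun row => ((PySem.List.pyGetD row ((y : Nat) : Int) ([] : List Char)).length : Int)) ∘
        (fun r : Nat => (List.range m).map (fun c : Nat => pvPCc D ((c : Nat) : Int) ((r : Nat) : Int))))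
      = fun r : Nat => ((pvPCc D ((y : Nat) : Int) ((r : Nat) : Int)).length : Int) := by
    funext r
    simp only [Function.comp]
    rw [PySem.List.pyGetD_natCast]
    rw [List.getD_eq_getElem _ _ (by simp; omega)]
    simp
  rw [h1]
  rw [pv_howWide_eq _ (pv_colN_ne_nil D n _)]
  congr 1
  apply pv_max_id_perm
  unfold pvColN
  rw [List.map_append, List.map_map, List.map_singleton]
  have h2 : ((fun x : List Char => (x.length : Int)) ∘ (fun r : Nat => pvPCc D ((y : Nat) : Int) ((r : Int) + 1)))
      = fun r : Nat => ((pvPCc D ((y : Nat) : Int) (((r + 1 : Nat) : Nat) : Int)).length : Int) := by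
    funext r
    simp only [Function.comp]
    congr 2
  rw [h2]
  have h3 := List.perm_append_singleton
    ((pvPCc D ((y : Nat) : Int) (((0 : Nat) : Nat) : Int)).length : Int)
    ((List.range (n - 1)).map (fun r : Nat => ((pvPCc D ((y : Nat) : Int) (((r + 1 : Nat) : Nat) : Int)).length : Int)))
  rw [pv_range_map_head n hn (fun r : Nat => ((pvPCc D ((y : Nat) : Int) ((r : Nat) : Int)).length : Int))]
  exact (h3.trans (by norm_num)).symm

theorem pv_acc_eq (col : List (List Char)) (hcol : col ≠ []) :
    ((PySem.List.pyGetD (pvPadSpaces col) 0 ([] : List Char)).length : Int) + 2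
      = pvHowWide col + 4 := by
  rw [pv_padSpaces_eq col hcol]
  rw [pv_headI_eq_getD0 _ (by simpa using hcol) _]
  cases col with
  | nil => cases hcol rfl
  | cons z rest =>
    simp only [List.map_cons, List.headI]
    have hz : (z.length : Int) ≤ pvHowWide (z :: rest) := pv_howWide_isMax _ z (by simp)
    have hnn : 0 ≤ pvHowWide (z :: rest) := pv_howWide_nonneg _
    simp only [List.length_append, List.length_replicate, List.length_cons, List.length_nil]
    push_cast
    omega

theorem pv_fill_eval (D : List (List (List Char))) (N M : Nat) (hN : 1 ≤ N) (hM : 1 ≤ M) :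
    (List.foldl
        (fun m x => List.foldl
            (fun m y => pvSet m (x - 1) (pvSet (PySem.List.pyGetD m (x - 1) []) (y - 1)
                (PySem.List.pyGetD (PySem.List.pyGetD D (y - 1) []) (x - 1) [])))
            m (PySem.List.pyRange 0 ((N : Nat) : Int) 1))
        (List.map (fun _ => List.map (fun _ => ['0']) (PySem.List.pyRange 0 ((N : Nat) : Int) 1))
          (PySem.List.pyRange 0 ((M : Nat) : Int) 1))
        (PySem.List.pyRange 0 ((M : Nat) : Int) 1))
      = (List.range (M - 1)).map (fun c : Nat => pvColN D N (((c + 1 : Nat) : Nat) : Int))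
          ++ [pvColN D N (((0 : Nat) : Nat) : Int)] := by
  have hcongr := PySem.List.foldl_congr_mem
    (l := PySem.List.pyRange 0 ((M : Nat) : Int) 1)
    (f := fun m x => List.foldl
        (fun m y => pvSet m (x - 1) (pvSet (PySem.List.pyGetD m (x - 1) []) (y - 1)
            (PySem.List.pyGetD (PySem.List.pyGetD D (y - 1) []) (x - 1) [])))
        m (PySem.List.pyRange 0 ((N : Nat) : Int) 1))
    (g := fun m x => pvSet m (x - 1)
        (List.foldl (fun col y => pvSet col (y - 1)
            (PySem.List.pyGetD (PySem.List.pyGetD D (y - 1) []) (x - 1) []))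
          (PySem.List.pyGetD m (x - 1) []) (PySem.List.pyRange 0 ((N : Nat) : Int) 1)))
    (init := List.map (fun _ => List.map (fun _ => ['0']) (PySem.List.pyRange 0 ((N : Nat) : Int) 1))
      (PySem.List.pyRange 0 ((M : Nat) : Int) 1))
    (fun acc x _ => pv_foldl_col (PySem.List.pyRange 0 ((N : Nat) : Int) 1)
      (fun col y => pvSet col (y - 1)
        (PySem.List.pyGetD (PySem.List.pyGetD D (y - 1) []) (x - 1) [])) (x - 1) acc)
  rw [hcongr]
  rw [pv_fill1d M hM
    (fun x c => List.foldl (fun col y => pvSet col (y - 1)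
        (PySem.List.pyGetD (PySem.List.pyGetD D (y - 1) []) (x - 1) [])) c
      (PySem.List.pyRange 0 ((N : Nat) : Int) 1))
    _ [] (by simp)]
  have hg : ∀ c : Nat, c < M →
      (List.map (fun _ => List.map (fun _ => ['0']) (PySem.List.pyRange 0 ((N : Nat) : Int) 1))
        (PySem.List.pyRange 0 ((M : Nat) : Int) 1)).getD c []
      = List.map (fun _ => ['0']) (PySem.List.pyRange 0 ((N : Nat) : Int) 1) := by
    intro c hc
    rw [List.getD_eq_getElem _ _ (by simp; omega)]
    simp
  have hFcol : ∀ x : Int,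
      List.foldl (fun col y => pvSet col (y - 1)
          (PySem.List.pyGetD (PySem.List.pyGetD D (y - 1) []) (x - 1) []))
        (List.map (fun _ => ['0']) (PySem.List.pyRange 0 ((N : Nat) : Int) 1))
        (PySem.List.pyRange 0 ((N : Nat) : Int) 1)
      = pvColN D N x := by
    intro x
    rw [pv_fill1d N hN
      (fun y _ => PySem.List.pyGetD (PySem.List.pyGetD D (y - 1) []) (x - 1) [])
      _ [] (by simp)]
    rfl
  congr 1
  · apply List.map_congr_left
    intro c hc
    rw [hg c (by have := List.mem_range.mp hc; omega), hFcol]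
    norm_cast
  · rw [hg (M - 1) (by omega), hFcol]
    norm_cast

theorem pv_pad_eval (D : List (List (List Char))) (N M : Nat) (hN : 1 ≤ N) (hM : 1 ≤ M) :
    (List.foldl
        (fun (st : List (List (List Char)) × Int) x =>
          (pvSet st.1 (x - 1) (pvPadSpaces (PySem.List.pyGetD st.1 (x - 1) [])),
            st.2 + ((PySem.List.pyGetD (PySem.List.pyGetD
                (pvSet st.1 (x - 1) (pvPadSpaces (PySem.List.pyGetD st.1 (x - 1) [])))
                (x - 1) []) 0 []).length : Int) + 2))
        ((List.range (M - 1)).map (fun c : Nat => pvColN D N (((c + 1 : Nat) : Nat) : Int))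
            ++ [pvColN D N (((0 : Nat) : Nat) : Int)], -10)
        (PySem.List.pyRange 0 ((M : Nat) : Int) 1))
      = ((List.range (M - 1)).map (fun c : Nat => pvPadSpaces (pvColN D N (((c + 1 : Nat) : Nat) : Int)))
            ++ [pvPadSpaces (pvColN D N (((0 : Nat) : Nat) : Int))],
         -10 + (pvHowWide (pvColN D N (((0 : Nat) : Nat) : Int)) + 4)
           + ((List.range (M - 1)).map (fun c : Nat =>
                pvHowWide (pvColN D N (((c + 1 : Nat) : Nat) : Int)) + 4)).sum) := by
  have hshape := PySem.List.foldl_congr_mem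
    (l := PySem.List.pyRange 0 ((M : Nat) : Int) 1)
    (f := fun (st : List (List (List Char)) × Int) x =>
      (pvSet st.1 (x - 1) (pvPadSpaces (PySem.List.pyGetD st.1 (x - 1) [])),
        st.2 + ((PySem.List.pyGetD (PySem.List.pyGetD
            (pvSet st.1 (x - 1) (pvPadSpaces (PySem.List.pyGetD st.1 (x - 1) [])))
            (x - 1) []) 0 []).length : Int) + 2))
    (g := fun (st : List (List (List Char)) × Int) x =>
      (pvSet st.1 (x - 1) (pvPadSpaces (PySem.List.pyGetD st.1 (x - 1) [])),
        st.2 + (((PySem.List.pyGetD (PySem.List.pyGetD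
            (pvSet st.1 (x - 1) (pvPadSpaces (PySem.List.pyGetD st.1 (x - 1) [])))
            (x - 1) []) 0 []).length : Int) + 2)))
    (init := ((List.range (M - 1)).map (fun c : Nat => pvColN D N (((c + 1 : Nat) : Nat) : Int))
        ++ [pvColN D N (((0 : Nat) : Nat) : Int)], -10))
    (fun acc x _ => by
      refine Prod.ext ?_ ?_
      · rfl
      · simp only []
        ring)
  rw [hshape]
  rw [pv_fill1d_pair M hM pvPadSpaces
    (fun col => ((PySem.List.pyGetD col 0 []).length : Int) + 2)
    _ (-10) [] (by simp; omega)]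
  have hinit : ∀ r : Nat, r ≤ M - 1 →
      ((List.range (M - 1)).map (fun c : Nat => pvColN D N (((c + 1 : Nat) : Nat) : Int))
          ++ [pvColN D N (((0 : Nat) : Nat) : Int)]).getD r []
        = pvColN D N ((((if r = M - 1 then 0 else r + 1) : Nat) : Nat) : Int) :=
    pv_getD_rot_list (M - 1) (fun c : Nat => pvColN D N ((c : Nat) : Int)) []
  have hacc : ∀ x : Int,
      ((PySem.List.pyGetD (pvPadSpaces (pvColN D N x)) 0 []).length : Int) + 2
        = pvHowWide (pvColN D N x) + 4 := fun x => pv_acc_eq _ (pv_colN_ne_nil D N x)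
  refine Prod.ext ?_ ?_
  · simp only []
    congr 1
    · apply List.map_congr_left
      intro c hc
      rw [hinit c (by have := List.mem_range.mp hc; omega), if_neg (by have := List.mem_range.mp hc; omega)]
    · rw [hinit (M - 1) le_rfl, if_pos rfl]
  · simp only []
    rw [hinit (M - 1) le_rfl, if_pos rfl, hacc]
    have hmapeq : (List.range (M - 1)).map (fun r : Nat =>
          ((PySem.List.pyGetD (pvPadSpaces ((((List.range (M - 1)).map
              (fun c : Nat => pvColN D N (((c + 1 : Nat) : Nat) : Int))
              ++ [pvColN D N (((0 : Nat) : Nat) : Int)]).getD r []))) 0 []).length : Int) + 2)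
        = (List.range (M - 1)).map (fun c : Nat =>
            pvHowWide (pvColN D N (((c + 1 : Nat) : Nat) : Int)) + 4) := by
      apply List.map_congr_left
      intro c hc
      rw [hinit c (by have := List.mem_range.mp hc; omega), if_neg (by have := List.mem_range.mp hc; omega), hacc]
    rw [hmapeq]

def pvCell (D : List (List (List Char))) (N : Nat) (y x : Nat) : List Char :=
  [' '] ++ pvPCc D ((y : Nat) : Int) ((x : Nat) : Int)
    ++ List.replicate ((pvHowWide (pvColN D N ((y : Nat) : Int))).toNat
        - (pvPCc D ((y : Nat) : Int) ((x : Nat) : Int)).length) ' '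
    ++ [' ']

def pvChunk (D : List (List (List Char))) (N M : Nat) (test : Int) (x y : Nat) : List Char :=
  pvCell D N y x ++ (if y = M - 1 then List.replicate (-test).toNat ' ' ++ "||".toList else "||".toList)

def pvLineA (D : List (List (List Char))) (N M : Nat) (test : Int) (x : Nat) : List Char :=
  "||".toList ++ (List.range M).flatMap (pvChunk D N M test x) ++ "\n".toList

-- the padded matrix column y, in A's rotated slot order, entry (x-1) → printed cell (x, y)
theorem pv_padded_col_rot (D : List (List (List Char))) (N : Nat) (hN : 1 ≤ N) (y : Nat) :
    pvPadSpaces (pvColN D N ((y : Nat) : Int))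
      = (List.range (N - 1)).map (fun r : Nat => pvCell D N y (r + 1)) ++ [pvCell D N y 0] := by
  rw [pv_padSpaces_eq _ (pv_colN_ne_nil D N _)]
  conv_lhs => rw [pvColN]
  rw [List.map_append, List.map_map, List.map_singleton]
  congr 1

theorem pv_cell_read (D : List (List (List Char))) (N M : Nat) (hN : 1 ≤ N) (hM : 1 ≤ M)
    (x y : Nat) (hx : x < N) (hy : y < M) :
    PySem.List.pyGetD (PySem.List.pyGetD
        ((List.range (M - 1)).map (fun c : Nat => pvPadSpaces (pvColN D N (((c + 1 : Nat) : Nat) : Int)))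
          ++ [pvPadSpaces (pvColN D N (((0 : Nat) : Nat) : Int))])
        (((y : Nat) : Int) - 1) [])
      (((x : Nat) : Int) - 1) []
      = pvCell D N y x := by
  rw [pv_getD_rot M (fun c : Nat => pvPadSpaces (pvColN D N ((c : Nat) : Int))) y hy]
  rw [pv_padded_col_rot D N hN y]
  exact pv_getD_rot N (fun r : Nat => pvCell D N y r) x hx []

theorem pv_emit_eval (D : List (List (List Char))) (N M : Nat) (hN : 1 ≤ N) (hM : 1 ≤ M)
    (test : Int) (s0 : List Char) :
    List.foldl
      (fun s x =>
        List.foldl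
          (fun s y =>
            if y + 1 ≠ ((M : Nat) : Int) ∧ test < 0 then
              s ++ PySem.List.pyGetD (PySem.List.pyGetD
                  ((List.range (M - 1)).map (fun c : Nat => pvPadSpaces (pvColN D N (((c + 1 : Nat) : Nat) : Int)))
                    ++ [pvPadSpaces (pvColN D N (((0 : Nat) : Nat) : Int))]) (y - 1) []) (x - 1) []
                ++ "||".toList
            else
              List.foldl (fun s _ => s ++ [' '])
                (s ++ PySem.List.pyGetD (PySem.List.pyGetD
                    ((List.range (M - 1)).map (fun c : Nat => pvPadSpaces (pvColN D N (((c + 1 : Nat) : Nat) : Int)))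
                      ++ [pvPadSpaces (pvColN D N (((0 : Nat) : Nat) : Int))]) (y - 1) []) (x - 1) [])
                (PySem.List.pyRange test 0 1) ++ "||".toList)
          (s ++ "||".toList) (PySem.List.pyRange 0 ((M : Nat) : Int) 1) ++ "\n".toList)
      s0 (PySem.List.pyRange 0 ((N : Nat) : Int) 1)
      = s0 ++ (List.range N).flatMap (pvLineA D N M test) := by
  rw [PySem.List.pyRange_zero_natCast (n := N), PySem.List.pyRange_zero_natCast (n := M)]
  simp only [List.foldl_map]
  have hinner : ∀ (x : Nat), x < N → ∀ (s : List Char),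
      List.foldl
        (fun s (y : Nat) =>
          if ((y : Nat) : Int) + 1 ≠ ((M : Nat) : Int) ∧ test < 0 then
            s ++ PySem.List.pyGetD (PySem.List.pyGetD
                ((List.range (M - 1)).map (fun c : Nat => pvPadSpaces (pvColN D N (((c + 1 : Nat) : Nat) : Int)))
                  ++ [pvPadSpaces (pvColN D N (((0 : Nat) : Nat) : Int))]) (((y : Nat) : Int) - 1) [])
              (((x : Nat) : Int) - 1) [] ++ "||".toList
          else
            List.foldl (fun s _ => s ++ [' '])
              (s ++ PySem.List.pyGetD (PySem.List.pyGetD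
                  ((List.range (M - 1)).map (fun c : Nat => pvPadSpaces (pvColN D N (((c + 1 : Nat) : Nat) : Int)))
                    ++ [pvPadSpaces (pvColN D N (((0 : Nat) : Nat) : Int))]) (((y : Nat) : Int) - 1) [])
                (((x : Nat) : Int) - 1) [])
              (PySem.List.pyRange test 0 1) ++ "||".toList)
        s (List.range M)
      = s ++ (List.range M).flatMap (pvChunk D N M test x) := by
    intro x hx s
    have hstep : ∀ (s' : List Char), ∀ y ∈ List.range M,
        (if ((y : Nat) : Int) + 1 ≠ ((M : Nat) : Int) ∧ test < 0 then
          s' ++ PySem.List.pyGetD (PySem.List.pyGetD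
              ((List.range (M - 1)).map (fun c : Nat => pvPadSpaces (pvColN D N (((c + 1 : Nat) : Nat) : Int)))
                ++ [pvPadSpaces (pvColN D N (((0 : Nat) : Nat) : Int))]) (((y : Nat) : Int) - 1) [])
            (((x : Nat) : Int) - 1) [] ++ "||".toList
        else
          List.foldl (fun s _ => s ++ [' '])
            (s' ++ PySem.List.pyGetD (PySem.List.pyGetD
                ((List.range (M - 1)).map (fun c : Nat => pvPadSpaces (pvColN D N (((c + 1 : Nat) : Nat) : Int)))
                  ++ [pvPadSpaces (pvColN D N (((0 : Nat) : Nat) : Int))]) (((y : Nat) : Int) - 1) [])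
              (((x : Nat) : Int) - 1) [])
            (PySem.List.pyRange test 0 1) ++ "||".toList)
        = s' ++ pvChunk D N M test x y := by
      intro s' y hy
      have hyM : y < M := List.mem_range.mp hy
      rw [pv_cell_read D N M hN hM x y hx hyM]
      unfold pvChunk
      rw [pv_foldl_const_append, pv_len_pyRange_to_zero]
      by_cases ht : test < 0
      · by_cases hyl : y = M - 1
        · rw [if_neg (by push_cast; omega), if_pos hyl]
          simp [List.append_assoc]
        · rw [if_pos ⟨by push_cast; omega, ht⟩, if_neg hyl]
          simp [List.append_assoc]
      · rw [if_neg (by tauto)]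
        have h0 : (-test).toNat = 0 := by omega
        by_cases hyl : y = M - 1 <;> simp [hyl, h0, List.append_assoc]
    rw [PySem.List.foldl_congr_mem _ _ (fun (s' : List Char) (y : Nat) => s' ++ pvChunk D N M test x y) _
      (fun acc y hy => hstep acc y hy)]
    exact PySem.List.foldl_append_eq_flatMap _ _ _
  rw [PySem.List.foldl_congr_mem _ _ (fun (s : List Char) (x : Nat) => s ++ pvLineA D N M test x) _
    (fun acc x hx => by
      rw [hinner x (List.mem_range.mp hx) (acc ++ "||".toList)]
      unfold pvLineA
      simp [List.append_assoc])]
  exact PySem.List.foldl_append_eq_flatMap _ _ _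

theorem pv_PCc_mem_colN (D : List (List (List Char))) (N : Nat) (c r : Nat) (hr : r < N) :
    pvPCc D ((c : Nat) : Int) ((r : Nat) : Int) ∈ pvColN D N ((c : Nat) : Int) := by
  unfold pvColN
  rcases Nat.eq_zero_or_pos r with rfl | hpos
  · apply List.mem_append_right
    simp
  · apply List.mem_append_left
    refine List.mem_map.mpr ⟨r - 1, List.mem_range.mpr (by omega), ?_⟩
    congr 1
    omega

-- B's rendered line (at filler length (-test).toNat) is A's canonical line
theorem pv_B_line_eq (D : List (List (List Char))) (N M : Nat) (hN : 1 ≤ N) (hM : 1 ≤ M)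
    (test : Int) (r : Nat) (hr : r < N) :
    "||".toList
        ++ PySem.Chars.join "||".toList
            ((((List.range M).map (fun c : Nat => pvPCc D ((c : Nat) : Int) ((r : Nat) : Int))).zip
                ((List.range M).map (fun c : Nat => pvHowWide (pvColN D N ((c : Nat) : Int))))).map
              (fun cw => [' '] ++ cw.1 ++ List.replicate (cw.2 - (cw.1.length : Int)).toNat ' ' ++ [' ']))
        ++ List.replicate (-test).toNat ' ' ++ "||".toList ++ "\n".toList
      = pvLineA D N M test r := by
  obtain ⟨K, rfl⟩ : ∃ K, M = K + 1 := ⟨M - 1, by omega⟩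
  rw [List.zip_map', List.map_map]
  have hcells : (List.range (K + 1)).map
        ((fun cw : List Char × Int => [' '] ++ cw.1 ++ List.replicate (cw.2 - (cw.1.length : Int)).toNat ' ' ++ [' ']) ∘
          (fun c : Nat => (pvPCc D ((c : Nat) : Int) ((r : Nat) : Int), pvHowWide (pvColN D N ((c : Nat) : Int)))))
      = (List.range (K + 1)).map (fun c : Nat => pvCell D N c r) := by
    apply List.map_congr_left
    intro c _
    simp only [Function.comp]
    unfold pvCell
    have hmem := pv_PCc_mem_colN D N c r hr
    have hle := pv_howWide_isMax (pvColN D N ((c : Nat) : Int)) _ hmem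
    have hnn := pv_howWide_nonneg (pvColN D N ((c : Nat) : Int))
    have ht : (pvHowWide (pvColN D N ((c : Nat) : Int))
          - ((pvPCc D ((c : Nat) : Int) ((r : Nat) : Int)).length : Int)).toNat
        = (pvHowWide (pvColN D N ((c : Nat) : Int))).toNat
          - (pvPCc D ((c : Nat) : Int) ((r : Nat) : Int)).length := by omega
    rw [ht]
  rw [hcells]
  have hne : ((List.range (K + 1)).map (fun c : Nat => pvCell D N c r)) ≠ [] := by simp
  rw [pv_join_shape _ _ hne]
  rw [List.range_succ, List.map_append, List.map_singleton, List.dropLast_concat, List.getLastD_concat]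
  unfold pvLineA
  rw [show (List.range (K + 1)).flatMap (pvChunk D N (K + 1) test r)
      = ((List.range K).flatMap (pvChunk D N (K + 1) test r)) ++ pvChunk D N (K + 1) test r K by
    rw [List.range_succ, List.flatMap_append]
    simp]
  have hpre : (List.range K).flatMap (pvChunk D N (K + 1) test r)
      = (List.range K).flatMap (fun y : Nat => pvCell D N y r ++ "||".toList) := by
    rw [List.flatMap_def, List.flatMap_def]
    congr 1
    apply List.map_congr_left
    intro y hy
    unfold pvChunk
    rw [if_neg (by have := List.mem_range.mp hy; omega)]
  have hlast : pvChunk D N (K + 1) test r K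
      = pvCell D N K r ++ (List.replicate (-test).toNat ' ' ++ "||".toList) := by
    unfold pvChunk
    rw [if_pos (by omega)]
  rw [hpre, hlast, List.flatMap_def]
  have hnl : ("\n".toList : List Char) = ['\n'] := by decide
  rw [hnl]
  simp [List.append_assoc]
  rfl

theorem pv_bar1_eq (t : List Char) :
    (PySem.List.pyRange 0 ((t.length : Nat) : Int) 1).foldl (fun b _ => b ++ ['=']) "---===".toList
      = "---===".toList ++ List.replicate t.length '=' := by
  rw [PySem.List.pyRange_zero_natCast, pv_foldl_const_append]
  simp

-- A's grown bar equals B's single bar at the shared overall width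
theorem pv_bar_eq (S : Int) (T : Nat) :
    (if S > (T : Int) then
        (("---===".toList ++ List.replicate T '=') ++ List.replicate (S - T).toNat '=')
          ++ "===---".toList
      else ("---===".toList ++ List.replicate T '=') ++ "===---".toList)
      = "---===".toList ++ List.replicate ((max (S + 12) ((T : Int) + 12)) - 12).toNat '='
          ++ "===---".toList := by
  by_cases h : S > (T : Int)
  · rw [if_pos h]
    rw [show ((max (S + 12) ((T : Int) + 12)) - 12).toNat = T + (S - T).toNat by omega]
    rw [List.replicate_add]
    simp
  · rw [if_neg h]
    rw [show ((max (S + 12) ((T : Int) + 12)) - 12).toNat = T by omega]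

set_option maxHeartbeats 2000000 in
theorem pv_main (rows : Int) (data0 : List (List String)) (title : String)
    (hpre : Pre_print_lookup rows data0 title) :
    print_lookup rows data0 title = print_lookup_alt rows data0 title := by
  unfold print_lookup print_lookup_alt
  by_cases hr0 : rows = 0
  · simp only [hr0, reduceIte]
    rw [pv_bar1_eq]
    congr 1
    have he : ("===---\n   Empty list```".toList : List Char)
        = "===---".toList ++ "\n".toList ++ "   Empty list```".toList := by decide
    rw [he]
    simp [List.append_assoc]
  · rcases hpre with h | ⟨hd0, hpre2⟩
    · exact absurd h hr0
    simp only [if_neg hr0]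
    have hDne : data0.map (fun r => r.map String.toList) ≠ [] := by simpa using hd0
    have hheadlen : (PySem.List.pyGetD (data0.map (fun r => r.map String.toList)) 0 []).length
        = data0.headI.length := by
      rw [pv_headI_eq_getD0 _ hDne []]
      cases data0 with
      | nil => cases hd0 rfl
      | cons a t => simp
    by_cases hm0 : data0.headI.length = 0
    · -- no columns: both sides print one bare rail per requested row
      have hz : (PySem.List.pyGetD (data0.map (fun r => r.map String.toList)) 0 []).length = 0 := by
        rw [hheadlen, hm0]
      rw [hz]
      have hpr : PySem.List.pyRange 0 (((0 : Nat)) : Int) 1 = [] := by decide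
      rw [hpr]
      simp only [List.foldl_nil, List.map_nil, List.zip_nil_right, reduceIte,
        List.sum_nil, List.isEmpty_nil, add_zero]
      have hT0 : (0 : Int) ≤ (title.toList.length : Int) := by positivity
      have hno : ¬((-10 : Int) > ((title.toList.length : Nat) : Int)) := by omega
      rw [if_neg hno, pv_bar1_eq]
      have hw : ((max (2 : Int) ((title.toList.length : Int) + 12)) - 12).toNat
          = title.toList.length := by omega
      rw [hw]
      have hc : List.foldl (fun (s : List Char) (_ : Int) => s ++ "||".toList ++ "\n".toList)
            = List.foldl (fun (s : List Char) (_ : Int) => s ++ ("||".toList ++ "\n".toList)) := by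
        funext s l
        apply PySem.List.foldl_congr_mem
        intro acc x _
        simp [List.append_assoc]
      rw [hc, PySem.List.foldl_append_eq_flatMap]
      have hlinesB : ((List.map (fun (_ : Int) => ([] : List (List Char)))
              (PySem.List.pyRange 0 rows 1)).map
            (fun _ => PySem.Chars.join "||".toList [([] : List Char)] ++ "||".toList ++ "\n".toList)).flatten
          = (PySem.List.pyRange 0 rows 1).flatMap (fun _ => "||".toList ++ "\n".toList) := by
        rw [List.map_map, List.flatMap_def]
        refine congrArg List.flatten ?_
        apply List.map_congr_left
        intro x _
        simp [PySem.Chars.join_singleton]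
      rw [hlinesB]
      have hnl : ("\n```".toList : List Char) = "\n".toList ++ "```".toList := by decide
      rw [hnl]
      simp [List.append_assoc]
    · -- at least one column
      rcases hpre2 with h0 | ⟨hrpos, hrle, hrows'⟩
      · exact absurd h0 hm0
      have hrn : rows = ((rows.toNat : Nat) : Int) := by omega
      have hn1 : 1 ≤ rows.toNat := by omega
      have hm1 : 1 ≤ data0.headI.length := Nat.pos_of_ne_zero hm0
      rw [hrn, hheadlen]
      set DD := data0.map (fun r => r.map String.toList) with hDD
      set N := rows.toNat with hNdef
      set M := data0.headI.length with hMdef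
      -- A side: canonical form
      rw [pv_fill_eval DD N M hn1 hm1]
      rw [pv_pad_eval DD N M hn1 hm1]
      simp only []
      rw [pv_emit_eval DD N M hn1 hm1]
      -- B side: grid in canonical range-map form
      have hgridB : (PySem.List.pyRange 0 ((N : Nat) : Int) 1).map (fun r =>
            (PySem.List.pyRange 0 ((M : Nat) : Int) 1).map (fun c =>
              PySem.List.pyGetD (PySem.List.pyGetD DD (r - 1) []) (c - 1) []))
          = (List.range N).map (fun r : Nat =>
              (List.range M).map (fun c : Nat => pvPCc DD ((c : Nat) : Int) ((r : Nat) : Int))) := by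
        rw [PySem.List.pyRange_zero_natCast (n := N), PySem.List.pyRange_zero_natCast (n := M),
          List.map_map]
        apply List.map_congr_left
        intro r _
        simp only [Function.comp]
        rw [List.map_map]
        rfl
      rw [hgridB]
      -- widths
      have hwidths : (PySem.List.pyRange 0 ((M : Nat) : Int) 1).map (fun c =>
            (PySem.List.max? (((List.range N).map (fun r : Nat =>
                (List.range M).map (fun c : Nat => pvPCc DD ((c : Nat) : Int) ((r : Nat) : Int)))).map
              (fun row => ((PySem.List.pyGetD row c []).length : Int))) (fun v => v)).getD 0)
          = (List.range M).map (fun c : Nat => pvHowWide (pvColN DD N ((c : Nat) : Int))) := by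
        rw [PySem.List.pyRange_zero_natCast, List.map_map]
        apply List.map_congr_left
        intro c hc
        simp only [Function.comp]
        exact pv_widthB_eq DD N M hn1 c (List.mem_range.mp hc)
      rw [hwidths]
      -- abbreviations
      set Wc : Nat → Int := fun c => pvHowWide (pvColN DD N ((c : Nat) : Int)) with hWc
      set T : Nat := title.toList.length with hT
      set SA : Int := -10 + (pvHowWide (pvColN DD N (((0 : Nat) : Nat) : Int)) + 4)
          + ((List.range (M - 1)).map (fun c : Nat =>
              pvHowWide (pvColN DD N (((c + 1 : Nat) : Nat) : Int)) + 4)).sum with hSA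
      set LW : Int := 2 + (((List.range M).map Wc).map (fun w => w + 4)).sum with hLW
      have hsum : SA = LW - 12 := by
        rw [hSA, hLW, List.map_map]
        rw [pv_range_map_head M hm1 ((fun w => w + 4) ∘ Wc)]
        simp only [List.sum_cons, Function.comp]
        rw [hWc]
        ring
      -- bar equality
      have hbar : (if SA > ((T : Nat) : Int) then
            ((PySem.List.pyRange 0 (SA - (T : Int)) 1).foldl (fun b _ => b ++ ['='])
              ((PySem.List.pyRange 0 ((T : Nat) : Int) 1).foldl (fun b _ => b ++ ['=']) "---===".toList))
              ++ "===---".toList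
          else ((PySem.List.pyRange 0 ((T : Nat) : Int) 1).foldl (fun b _ => b ++ ['=']) "---===".toList)
              ++ "===---".toList)
          = "---===".toList ++ List.replicate ((max LW ((T : Int) + 12)) - 12).toNat '='
              ++ "===---".toList := by
        rw [pv_bar1_eq]
        rw [show (PySem.List.pyRange 0 (SA - (T : Int)) 1).foldl (fun b _ => b ++ ['='])
              ("---===".toList ++ List.replicate T '=')
            = ("---===".toList ++ List.replicate T '=') ++ List.replicate (SA - (T : Int)).toNat '=' by
          rw [pv_foldl_const_append, pv_pyRange_to_toNat]
          simp]
        rw [show max LW ((T : Int) + 12) = max (SA + 12) ((T : Int) + 12) by omega]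
        exact pv_bar_eq SA T
      -- filler length
      have hfill : ((max LW ((T : Int) + 12)) - LW).toNat = (-(SA - (T : Int))).toNat := by omega
      -- lines equality
      have hlines : ((List.range N).map (fun r : Nat =>
              (List.range M).map (fun c : Nat => pvPCc DD ((c : Nat) : Int) ((r : Nat) : Int)))).map
            (fun row =>
              PySem.Chars.join "||".toList (([] : List Char) ::
                (if ((row.zip ((List.range M).map Wc)).map (fun cw =>
                      [' '] ++ cw.1 ++ List.replicate (cw.2 - (cw.1.length : Int)).toNat ' ' ++ [' '])).isEmpty then
                    (row.zip ((List.range M).map Wc)).map (fun cw =>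
                      [' '] ++ cw.1 ++ List.replicate (cw.2 - (cw.1.length : Int)).toNat ' ' ++ [' '])
                  else
                    ((row.zip ((List.range M).map Wc)).map (fun cw =>
                      [' '] ++ cw.1 ++ List.replicate (cw.2 - (cw.1.length : Int)).toNat ' ' ++ [' '])).dropLast
                      ++ [((row.zip ((List.range M).map Wc)).map (fun cw =>
                            [' '] ++ cw.1 ++ List.replicate (cw.2 - (cw.1.length : Int)).toNat ' ' ++ [' '])).getLastD []
                          ++ List.replicate ((max LW ((T : Int) + 12)) - LW).toNat ' ']))
                ++ "||".toList ++ "\n".toList)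
          = (List.range N).map (pvLineA DD N M (SA - (T : Int))) := by
        rw [List.map_map]
        apply List.map_congr_left
        intro r hr
        simp only [Function.comp]
        set row := (List.range M).map (fun c : Nat => pvPCc DD ((c : Nat) : Int) ((r : Nat) : Int)) with hrow
        set cells := (row.zip ((List.range M).map Wc)).map (fun cw =>
          [' '] ++ cw.1 ++ List.replicate (cw.2 - (cw.1.length : Int)).toNat ' ' ++ [' ']) with hcells
        have hclen : cells.length = M := by
          rw [hcells, List.length_map, List.length_zip, hrow]
          simp
        have hcne : cells ≠ [] := by
          intro hh; rw [hh] at hclen; simp at hclen; omega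
        rw [if_neg (by simpa using hcne)]
        rw [pv_join_nil_cons _ _ (by simp), pv_join_pad_last _ _ _ hcne]
        rw [hfill]
        rw [← pv_B_line_eq DD N M hn1 hm1 (SA - (T : Int)) r (List.mem_range.mp hr)]
        rw [hcells, hrow]
        simp [List.append_assoc]
        rw [hWc]
      rw [hbar, hlines]
      congr 1
      have hnl : ("\n```".toList : List Char) = "\n".toList ++ "```".toList := by decide
      rw [hnl, List.flatMap_def]
      simp [List.append_assoc]

-- ===== VERDICT (by name: the statement is the Claim_ definition above) =====
theorem print_lookup_spec : Claim_equal_print_lookup := by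
  intro rows data title _ hpre
  unfold Spec_print_lookup
  exact pv_main rows data title hpre
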